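-- pv_equiv track=rewrite | github.com/MendelDebrabandere/ScriptingtalenUgent | Reeks_04/Eiwitcodes.py | isaminowoord
-- ===== SOURCE A (Python) =====
-- def isaminowoord(w):
--     """
--     >>> isaminowoord('ALEA')
--     True
--     >>> isaminowoord('iacta')
--     True
--     >>> isaminowoord('Proline')
--     False
--     """
--
--     if len(w) < 2:
--         return False
--
--     nietAminoLetters = {'B', 'J', 'O', 'U', 'X', 'Z'}
--
--     for letter in w.upper():
--         if not letter.isalpha() or letter in nietAminoLetters:
--             return False
--
--     return True
-- ===== SOURCE B (Python) =====
-- def isaminowoord(w):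
--     u = w.upper()
--     if len(w) < 2 or not u.isalpha():
--         return False
--     for forbidden in 'BJOUXZ':
--         if forbidden in u:
--             return False
--     return True
-- ===== Notes on version B (the rewrite author's own statement) =====
-- stated objective: alternative
-- what changed: Inverts the traversal: instead of scanning the word once testing each character against the forbidden set, B checks the whole word with a bulk isalpha and then loops over the six forbidden letters, doing one substring-membership search of the word per forbidden letter.
import Mathlib
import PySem

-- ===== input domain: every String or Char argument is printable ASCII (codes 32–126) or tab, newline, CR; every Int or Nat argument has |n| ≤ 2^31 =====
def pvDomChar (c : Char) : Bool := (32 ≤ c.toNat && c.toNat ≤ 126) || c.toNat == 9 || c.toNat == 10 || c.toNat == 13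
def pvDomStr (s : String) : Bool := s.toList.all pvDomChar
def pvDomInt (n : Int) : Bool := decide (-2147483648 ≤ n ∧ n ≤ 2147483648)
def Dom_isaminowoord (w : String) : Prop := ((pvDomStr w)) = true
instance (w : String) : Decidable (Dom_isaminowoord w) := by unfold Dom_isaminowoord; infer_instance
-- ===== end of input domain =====

-- B inverts the traversal: a bulk isalpha check on the word, then a loop over the
-- six forbidden letters testing substring membership in the word; same cost as A.

-- ===== PORT A =====
def nietAminoLetters : PySem.Set Char := PySem.Set.ofList ['B', 'J', 'O', 'U', 'X', 'Z']

-- A's for-loop with early return, as structural recursion over the upper-cased characters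
def isaminowoordLoop : List Char → Bool
  | [] => true
  | letter :: rest =>
      if !(PySem.Chars.isalpha letter) || nietAminoLetters.contains letter then false
      else isaminowoordLoop rest

def isaminowoord (w : String) : Bool :=
  if PySem.Str.len w < 2 then false
  else isaminowoordLoop (PySem.Str.upper w).toList

-- ===== PORT B =====
-- B's for-loop over the forbidden letters, with early return: 'if forbidden in u: return False'
def isaminowoordAltLoop (u : String) : List Char → Bool
  | [] => true
  | f :: rest =>
      if PySem.Str.isIn (String.ofList [f]) u then false
      else isaminowoordAltLoop u rest

def isaminowoord_alt (w : String) : Bool :=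
  let u := PySem.Str.upper w
  if PySem.Str.len w < 2 || !(PySem.Str.strIsalpha u) then false
  else isaminowoordAltLoop u "BJOUXZ".toList

-- ===== PRECONDITION & SPEC =====
def Spec_isaminowoord (w : String) (out : Bool) : Prop := out = isaminowoord_alt w
instance (w : String) (out : Bool) : Decidable (Spec_isaminowoord w out) := by unfold Spec_isaminowoord; infer_instance

-- ===== CLAIM =====
def Claim_equal_isaminowoord : Prop := ∀ (w : String), Dom_isaminowoord w → Spec_isaminowoord w (isaminowoord w)

-- ===== LEMMAS AND PROOFS =====

-- A's loop returns true iff every character is alphabetic and not forbidden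
theorem isaminowoordLoop_eq_all (cs : List Char) :
    isaminowoordLoop cs
      = cs.all (fun c => PySem.Chars.isalpha c && !(nietAminoLetters.contains c)) := by
  induction cs with
  | nil => rfl
  | cons c rest ih =>
      simp only [isaminowoordLoop, List.all_cons, ih]
      by_cases h1 : PySem.Chars.isalpha c <;> by_cases h2 : nietAminoLetters.contains c <;>
        simp [h1]

-- 'f in u' for a single-character string is character membership
theorem strIsIn_singleton (f : Char) (u : String) :
    PySem.Str.isIn (String.ofList [f]) u = decide (f ∈ u.toList) := by
  have key : PySem.Str.isIn (String.ofList [f]) u = true ↔ f ∈ u.toList := by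
    rw [PySem.Str.isIn_iff_infix]
    simp [List.singleton_infix_iff]
  by_cases h : f ∈ u.toList
  · rw [key.mpr h, decide_eq_true h]
  · have hfalse : PySem.Str.isIn (String.ofList [f]) u = false := by
      rw [Bool.eq_false_iff]
      exact fun hc => h (key.mp hc)
    rw [hfalse, decide_eq_false h]

-- membership in the forbidden set is membership in the literal letter list
theorem contains_nietAmino (c : Char) :
    nietAminoLetters.contains c = decide (c ∈ "BJOUXZ".toList) := by
  by_cases h : c ∈ "BJOUXZ".toList
  · rw [decide_eq_true h]
    rw [PySem.Set.contains_iff]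
    simp only [nietAminoLetters, PySem.Set.mem_ofList]
    simpa using h
  · rw [decide_eq_false h, Bool.eq_false_iff]
    intro hc
    rw [PySem.Set.contains_iff] at hc
    simp only [nietAminoLetters, PySem.Set.mem_ofList] at hc
    exact h (by simpa using hc)

-- B's loop returns true iff none of the forbidden letters occurs in u
theorem isaminowoordAltLoop_eq_all (u : String) (fs : List Char) :
    isaminowoordAltLoop u fs = fs.all (fun f => decide (f ∉ u.toList)) := by
  induction fs with
  | nil => rfl
  | cons f rest ih =>
      simp only [isaminowoordAltLoop, List.all_cons, ih, strIsIn_singleton]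
      by_cases h : f ∈ u.toList <;> simp [h]

-- ===== VERDICT =====
theorem isaminowoord_spec : Claim_equal_isaminowoord := by
  intro w _
  unfold Spec_isaminowoord
  have halt : isaminowoord_alt w
      = (if (decide (PySem.Str.len w < 2) || !(PySem.Str.strIsalpha (PySem.Str.upper w))) = true
          then false
          else isaminowoordAltLoop (PySem.Str.upper w) "BJOUXZ".toList) := rfl
  rw [halt]
  unfold isaminowoord
  by_cases h : PySem.Str.len w < 2
  · rw [if_pos h, if_pos (by rw [decide_eq_true h, Bool.true_or])]
  · have hlenInt : PySem.Str.len w = (w.toList.length : Int) := by simp [PySem.Str.len]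
    rw [hlenInt] at h
    have hne : (PySem.Str.upper w).toList ≠ [] := by
      simp only [PySem.Str.toList_upper, PySem.Chars.upper]
      intro hnil
      have hl := congrArg List.length hnil
      simp only [List.length_map, List.length_nil] at hl
      omega
    have h' : ¬ PySem.Str.len w < 2 := by rw [hlenInt]; exact h
    by_cases ha : PySem.Str.strIsalpha (PySem.Str.upper w) = true
    · rw [if_neg h', if_neg (by rw [decide_eq_false h', ha]; decide), isaminowoordLoop_eq_all,
        isaminowoordAltLoop_eq_all]
      have hall : ∀ c ∈ (PySem.Str.upper w).toList, PySem.Chars.isalpha c = true := by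
        rw [PySem.Str.strIsalpha_eq, PySem.Chars.strIsalpha] at ha
        simp only [Bool.and_eq_true, List.all_eq_true] at ha
        exact fun c hc => ha.2 c hc
      rw [Bool.eq_iff_iff]
      simp only [List.all_eq_true, Bool.and_eq_true, contains_nietAmino, Bool.not_eq_true',
        decide_eq_false_iff_not, decide_eq_true_eq]
      constructor
      · intro hA f hf hmem
        exact (hA f hmem).2 hf
      · intro hB c hc
        exact ⟨hall c hc, fun hx => hB c hx hc⟩
    · rw [if_neg h', if_pos (by rw [Bool.eq_false_iff.mpr ha]; simp), isaminowoordLoop_eq_all]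
      have hnotall : ¬ ((PySem.Str.upper w).toList.all PySem.Chars.isalpha = true) := by
        intro hcontra
        apply ha
        rw [PySem.Str.strIsalpha_eq, PySem.Chars.strIsalpha]
        simp only [PySem.Str.toList_upper] at hcontra hne
        simp [hcontra, hne]
      simp only [List.all_eq_true, not_forall] at hnotall
      obtain ⟨c, hc, hcn⟩ := hnotall
      rw [List.all_eq_false]
      exact ⟨c, hc, by simp [hcn]⟩
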